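-- pv_equiv track=rewrite | github.com/shoark7/algorithm-with-python | problems_solving/baekjoon/ox_quiz.py | get_total_score
-- ===== SOURCE A (Python) =====
-- def sum_from(n, _from=0):
--     return _from if n == _from else n + sum_from(n-1, _from)
--
-- def get_total_score(ox):
--     ox = 'X' + ox + 'X'
--     last = 0
--     score = 0
--     for i in range(1, len(ox)):
--         if ox[i] == 'X':
--             count = i - last - 1
--             score += sum_from(count)
--             last = i
--     return score
-- ===== SOURCE B (Python) =====
-- def get_total_score(ox):
--     streak = 0
--     score = 0
--     for c in ox:
--         if c == 'X':
--             streak = 0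
--         else:
--             streak += 1
--             score += streak
--     return score
-- ===== Notes on version B (the rewrite author's own statement) =====
-- stated objective: simpler
-- what changed: Replaces the sentinel-padded boundary scan with a recursive triangular-sum helper by a single streaming pass that maintains a running streak and adds it to the score at each non-'X' character.
import Mathlib
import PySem

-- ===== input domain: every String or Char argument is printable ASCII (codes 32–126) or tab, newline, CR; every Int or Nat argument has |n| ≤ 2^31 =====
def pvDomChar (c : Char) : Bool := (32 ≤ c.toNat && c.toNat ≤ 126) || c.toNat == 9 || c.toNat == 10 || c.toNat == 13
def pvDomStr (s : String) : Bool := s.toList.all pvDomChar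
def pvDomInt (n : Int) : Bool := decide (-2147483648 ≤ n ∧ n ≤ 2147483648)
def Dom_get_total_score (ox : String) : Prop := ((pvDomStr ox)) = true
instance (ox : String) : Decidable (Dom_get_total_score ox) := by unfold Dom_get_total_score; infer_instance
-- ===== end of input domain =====

-- B replaces A's pad-with-sentinels + triangular-sum-per-segment scan by a single
-- streaming pass with a running streak accumulator (simpler decomposition).


-- ===== PORT A =====
-- Python's sum_from(n) recursion (0 if n == 0 else n + sum_from(n-1)); only called on
-- counts n ≥ 0 (a boundary index minus the previous boundary index minus 1), so a Nat
-- argument is exact on every reachable call.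
def sumFromA : Nat → Int
  | 0 => 0
  | n + 1 => (↑n + 1) + sumFromA n

-- the for-loop of A: `rest` is the suffix of the padded string from index i on;
-- the loop runs for i in range(1, len(padded)), i.e. over padded.drop 1.
-- `i - last - 1` uses Nat subtraction; it is exact because last < i at every call.
def loopA : List Char → Nat → Nat → Int → Int
  | [], _, _, score => score
  | c :: rest, i, last, score =>
    if c = 'X' then loopA rest (i + 1) i (score + sumFromA (i - last - 1))
    else loopA rest (i + 1) last score

def get_total_score (ox : String) : Int :=
  let padded := 'X' :: ox.toList ++ ['X']   -- ox = 'X' + ox + 'X'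
  loopA (padded.drop 1) 1 0 0

-- ===== PORT B =====
def stepB (st : Int × Int) (c : Char) : Int × Int :=
  if c = 'X' then (0, st.2) else (st.1 + 1, st.2 + (st.1 + 1))

def get_total_score_alt (ox : String) : Int :=
  (ox.toList.foldl stepB (0, 0)).2

-- ===== PRECONDITION & SPEC =====
def Spec_get_total_score (ox : String) (out : Int) : Prop := out = get_total_score_alt ox
instance (ox : String) (out : Int) : Decidable (Spec_get_total_score ox out) := by unfold Spec_get_total_score; infer_instance

-- ===== CLAIM (what is proved, stated in full; the proofs are below) =====
def Claim_equal_get_total_score : Prop := ∀ (ox : String), Dom_get_total_score ox → Spec_get_total_score ox (get_total_score ox)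

-- ===== LEMMAS AND PROOFS =====
theorem sumFromA_succ (n : Nat) : sumFromA (n + 1) = (↑n + 1) + sumFromA n := rfl

theorem key (cs : List Char) : ∀ (s i last : Nat) (acc : Int),
    last < i → i - last - 1 = s →
    loopA (cs ++ ['X']) i last (acc - sumFromA s) = (cs.foldl stepB ((s : Int), acc)).2 := by
  induction cs with
  | nil =>
    intro s i last acc hlt hs
    simp [loopA, hs]
  | cons c cs ih =>
    intro s i last acc hlt hs
    by_cases hc : c = 'X'
    · have h1 : acc - sumFromA s + sumFromA (i - last - 1) = acc := by rw [hs]; ring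
      simp only [List.cons_append, loopA, hc, h1, List.foldl_cons, stepB, if_true]
      have := ih 0 (i + 1) i acc (Nat.lt_succ_self i) (by omega)
      simpa [sumFromA] using this
    · have h3 : acc - sumFromA s = (acc + ((s : Int) + 1)) - sumFromA (s + 1) := by
        rw [sumFromA_succ]; ring
      simp only [List.cons_append, loopA, List.foldl_cons, stepB, if_neg hc]
      rw [h3]
      have := ih (s + 1) (i + 1) last (acc + ((s : Int) + 1)) (by omega) (by omega)
      rw [this]
      norm_num [Int.add_comm]

theorem get_total_score_eq (ox : String) : get_total_score ox = get_total_score_alt ox := by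
  unfold get_total_score get_total_score_alt
  have h0 : (0 : Int) = 0 - sumFromA 0 := by simp [sumFromA]
  show loopA (ox.toList ++ ['X']) 1 0 0 = _
  rw [h0]
  exact key ox.toList 0 1 0 0 (by omega) (by omega)

-- ===== VERDICT (by name: the statement is the Claim_ definition above) =====
theorem get_total_score_spec : Claim_equal_get_total_score := by
  intro ox _
  unfold Spec_get_total_score
  exact get_total_score_eq ox
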